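-- pv_equiv track=rewrite | github.com/GlebK2004/1CSalesReportULC | data_file.py | add_space_every_3_digits
-- ===== SOURCE A (Python) =====
-- def add_space_every_3_digits(number):
--     number_str = str(int(number))
--     result = ''
--     for i, digit in enumerate(reversed(number_str)):
--         if i > 0 and i % 3 == 0:
--             result = ' ' + result
--         result = digit + result
--     return result
-- ===== SOURCE B (Python) =====
-- def add_space_every_3_digits(number):
--     def chunks(t):
--         r = len(t) % 3 or 3
--         head, rest = t[:r], t[r:]
--         return head if not rest else head + ' ' + chunks(rest)
--     return chunks(str(int(number)))
-- ===== Notes on version B (the rewrite author's own statement) =====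
-- stated objective: simpler
-- what changed: Replaces A's indexed character-by-character loop over the reversed string (prepending chars and spaces one at a time) with a recursive slicing of the string into blocks of 3 from the right (first block of length len%3 or 3) joined by spaces.
import Mathlib
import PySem

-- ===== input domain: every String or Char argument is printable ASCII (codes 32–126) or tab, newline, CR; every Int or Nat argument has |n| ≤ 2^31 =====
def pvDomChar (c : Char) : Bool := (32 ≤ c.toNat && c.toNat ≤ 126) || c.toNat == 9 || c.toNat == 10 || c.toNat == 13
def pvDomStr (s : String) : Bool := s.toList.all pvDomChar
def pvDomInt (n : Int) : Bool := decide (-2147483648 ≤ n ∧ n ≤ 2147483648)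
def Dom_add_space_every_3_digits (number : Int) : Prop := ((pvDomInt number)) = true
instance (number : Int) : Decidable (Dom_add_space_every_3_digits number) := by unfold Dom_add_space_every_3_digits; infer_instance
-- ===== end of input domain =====

-- B replaces A's indexed character-by-character prepend loop by a recursive chunking of the
-- digit string into blocks (first block of length len%3 or 3, then blocks of 3) joined by spaces:
-- a simpler decomposition, same O(n) cost.

-- ===== PORT A =====
-- literal port of A: fold over enumerate(reversed(str(number))), prepending to result
def add_space_every_3_digits (number : Int) : String :=
  let number_str := PySem.Int.toStr number
  String.mk ((PySem.List.enumerate number_str.toList.reverse).foldl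
    (fun result p =>
      let result := if p.1 > 0 ∧ p.1 % 3 = 0 then ' ' :: result else result
      p.2 :: result) [])

-- ===== PORT B =====
-- port of Source B's recursive helper `chunks`
def pvChunks (t : List Char) : List Char :=
  let r := if t.length % 3 = 0 then 3 else t.length % 3
  if h : t.drop r = [] then t.take r
  else t.take r ++ ' ' :: pvChunks (t.drop r)
termination_by t.length
decreasing_by
  simp only [List.length_drop]
  have hr : 0 < r := by
    simp only [r]; split
    · omega
    · rename_i hne; omega
  have : r < t.length := by
    by_contra hge
    exact h (List.drop_eq_nil_of_le (by omega))
  omega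

def add_space_every_3_digits_alt (number : Int) : String :=
  String.mk (pvChunks (PySem.Int.toStr number).toList)

-- ===== PRECONDITION & SPEC =====
def Spec_add_space_every_3_digits (number : Int) (out : String) : Prop := out = add_space_every_3_digits_alt number
instance (number : Int) (out : String) : Decidable (Spec_add_space_every_3_digits number out) := by unfold Spec_add_space_every_3_digits; infer_instance

-- ===== CLAIM (what is proved, stated in full; the proofs are below) =====
def Claim_equal_add_space_every_3_digits : Prop := ∀ (number : Int), Dom_add_space_every_3_digits number → Spec_add_space_every_3_digits number (add_space_every_3_digits number)

-- ===== LEMMAS AND PROOFS =====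

-- A's loop body, named for the proofs
def pvStep (result : List Char) (p : Int × Char) : List Char :=
  p.2 :: (if p.1 > 0 ∧ p.1 % 3 = 0 then ' ' :: result else result)

theorem pvFold_append (x y : List Char) (s : Int) (acc : List Char) :
    (PySem.List.enumerate (x ++ y) s).foldl pvStep acc
      = (PySem.List.enumerate y (s + x.length)).foldl pvStep
          ((PySem.List.enumerate x s).foldl pvStep acc) := by
  rw [PySem.List.enumerate_append, List.foldl_append]

-- a block of ≤ 3 characters at positive offset k ≡ 0 (mod 3): prepend the block and a space
theorem pvFold_block (u : List Char) (k : Int) (acc : List Char)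
    (h1 : 1 ≤ u.length) (h3 : u.length ≤ 3) (hk : 0 < k) (hm : k % 3 = 0) :
    (PySem.List.enumerate u.reverse k).foldl pvStep acc = u ++ ' ' :: acc := by
  match u, h1, h3 with
  | [a], _, _ =>
      simp [PySem.List.enumerate_cons, pvStep, hk, hm]
  | [a, b], _, _ =>
      have : ¬ ((k + 1) % 3 = 0) := by omega
      simp [PySem.List.enumerate_cons, pvStep, hk, hm, this]
  | [a, b, c], _, _ =>
      have h2 : ¬ ((k + 1) % 3 = 0) := by omega
      have h4 : ¬ ((k + 1 + 1) % 3 = 0) := by omega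
      simp [PySem.List.enumerate_cons, pvStep, hk, hm, h2, h4]

-- the first (leftmost) block, at offset 0: just the block itself
theorem pvFold_base (u : List Char) (h3 : u.length ≤ 3) :
    (PySem.List.enumerate u.reverse 0).foldl pvStep [] = u := by
  match u, h3 with
  | [], _ => simp [PySem.List.enumerate_nil]
  | [a], _ => simp [PySem.List.enumerate_cons, pvStep]
  | [a, b], _ => simp [PySem.List.enumerate_cons, pvStep]
  | [a, b, c], _ => simp [PySem.List.enumerate_cons, pvStep]

theorem pvFold_eq_chunks_aux (n : Nat) : ∀ l : List Char, l.length ≤ n →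
    (PySem.List.enumerate l.reverse 0).foldl pvStep [] = pvChunks l := by
  induction n with
  | zero =>
      intro l hl
      have hnil : l = [] := by cases l <;> simp_all
      subst hnil
      rw [pvChunks]
      simp [PySem.List.enumerate_nil]
  | succ n ih =>
      intro l hl
      rw [pvChunks]
      set r : Nat := if l.length % 3 = 0 then 3 else l.length % 3 with hr
      have hr1 : 1 ≤ r := by simp only [hr]; split <;> omega
      have hr3 : r ≤ 3 := by simp only [hr]; split <;> omega
      have hrmod : l.length % 3 = r % 3 := by simp only [hr]; split <;> omega
      split
      · -- drop r = []: whole list is one block of length ≤ 3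
        rename_i hnil
        have hd : (l.drop r).length = l.length - r := List.length_drop
        rw [hnil] at hd
        simp at hd
        rw [List.take_of_length_le (by omega)]
        exact pvFold_base l (by omega)
      · -- split off the leftmost block u = take r, recurse on v = drop r
        rename_i hnil
        have hrlt : r < l.length := by
          by_contra hge
          exact hnil (List.drop_eq_nil_of_le (by omega))
        have hu : (l.take r).length = r := by simp; omega
        have hv : (l.drop r).length = l.length - r := List.length_drop
        have hvm : (l.length - r) % 3 = 0 := by omega
        conv_lhs => rw [← List.take_append_drop r l]
        rw [List.reverse_append, pvFold_append, ih (l.drop r) (by omega)]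
        rw [List.length_reverse, hv]
        have hb := pvFold_block (l.take r) ((l.length - r : Nat) : Int) (pvChunks (l.drop r))
          (by rw [hu]; omega) (by rw [hu]; omega) (by omega) (by omega)
        rw [show ((0 : Int) + ((l.length - r : Nat) : Int)) = ((l.length - r : Nat) : Int) by ring]
        exact hb

theorem pvFold_eq_chunks (l : List Char) :
    (PySem.List.enumerate l.reverse 0).foldl pvStep [] = pvChunks l :=
  pvFold_eq_chunks_aux l.length l le_rfl

-- ===== VERDICT (by name: the statement is the Claim_ definition above) =====
theorem add_space_every_3_digits_spec : Claim_equal_add_space_every_3_digits := by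
  intro number _
  show _ = _
  unfold add_space_every_3_digits add_space_every_3_digits_alt
  simp only
  rw [show (fun (result : List Char) (p : Int × Char) =>
        p.2 :: (if p.1 > 0 ∧ p.1 % 3 = 0 then ' ' :: result else result)) = pvStep from rfl]
  rw [pvFold_eq_chunks]
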